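-- pv_equiv track=rewrite | github.com/myakhlaqi/codility_practice | EquiLeader-8.py | leader_all
-- ===== SOURCE A (Python) =====
-- from collections import deque
--
-- def leader_all(A):
--     stack=deque()
--     counter=0
--     leaders=[]
--     for i,value in enumerate(A):
--         if(len(stack)==0):
--             stack.append(value)
--             counter+=1
--
--         else:
--             if(value!=stack[-1]):
--                 stack.pop()
--             else:
--                 stack.append(value)
--                 counter+=1
--         if(counter>((i+1)//2)):
--             leaders.append(stack[0])
--         else:
--             leaders.append(None)
--     return leaders
-- ===== SOURCE B (Python) =====
-- def leader_all(A):
--     # Block decomposition: the scan splits into maximal "voting blocks"; each block's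
--     # candidate is its first element, and inside a block we count occurrences of the
--     # candidate, reporting it while 2*matches > length and closing the block when
--     # 2*matches == length.  No deque, no cumulative push counter, no +/-1 vote state.
--     out = []
--     n = len(A)
--     start = 0
--     while start < n:
--         cand = A[start]
--         matches = 0
--         k = start
--         while k < n:
--             if A[k] == cand:
--                 matches += 1
--             k += 1
--             length = k - start
--             out.append(cand if 2 * matches > length else None)
--             if 2 * matches == length:
--                 break
--         start = k
--     return out
-- ===== Notes on version B (the rewrite author's own statement) =====
-- stated objective: alternative
-- what changed: Replaces A's single deque-and-push-counter scan by a block decomposition: a nested loop over maximal voting blocks whose candidate is the block's first element, counting occurrences of that candidate and testing 2*matches against the block length instead of maintaining a deque or a cumulative counter.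
import Mathlib
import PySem

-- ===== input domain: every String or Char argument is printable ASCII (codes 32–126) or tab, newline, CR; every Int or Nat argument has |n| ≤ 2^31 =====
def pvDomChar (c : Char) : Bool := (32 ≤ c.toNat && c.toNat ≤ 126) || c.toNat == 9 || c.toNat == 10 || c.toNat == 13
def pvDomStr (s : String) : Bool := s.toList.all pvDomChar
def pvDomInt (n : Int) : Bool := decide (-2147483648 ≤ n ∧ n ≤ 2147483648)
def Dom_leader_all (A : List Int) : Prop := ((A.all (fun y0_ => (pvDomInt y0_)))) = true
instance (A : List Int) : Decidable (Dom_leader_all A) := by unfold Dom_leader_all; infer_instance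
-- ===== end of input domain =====

-- B replaces A's deque-and-push-counter scan by a block decomposition: the list splits
-- into maximal voting blocks, each block's candidate is its first element, and within a
-- block it counts occurrences of the candidate (test 2*matches vs length); same output,
-- genuinely different loop structure and state (objective: alternative).


-- ===== PORT A =====
-- A's loop: stack models the deque (head = stack[0], last = stack[-1]); counter counts pushes;
-- at index i it appends stack[0] if counter > (i+1)//2 else None.  stack[-1] / stack[0] are only
-- read when the stack is nonempty (the guards ensure it), so getLast! / head! are exact there;
-- (i+1)//2 on the nonnegative Nat index is Python's floor division.
def leaderAllGo (stack : List Int) (counter : Int) (i : Nat) : List Int → List (Option Int)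
  | [] => []
  | value :: rest =>
    let sc :=
      if stack.length = 0 then (stack ++ [value], counter + 1)
      else if value ≠ stack.getLast! then (stack.dropLast, counter)
      else (stack ++ [value], counter + 1)
    (if sc.2 > (((i + 1) / 2 : Nat) : Int) then some sc.1.head! else none)
      :: leaderAllGo sc.1 sc.2 (i + 1) rest

def leader_all (A : List Int) : List (Option Int) :=
  leaderAllGo [] 0 0 A

-- ===== PORT B =====
-- Source B's inner while loop: indices k into A (A[k] in range iff pyGet? returns some, i.e. k < n,
-- which is the Python loop guard); fuel = n - k bounds the recursion and never runs out before
-- the guard fails.  Returns the entries appended by the block together with the final k.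
def leaderAltInner (A : List Int) (start : Nat) (cand : Int) :
    Nat → Nat → Int → List (Option Int) × Nat
  | 0, k, _ => ([], k)
  | fuel + 1, k, mcnt =>
    match PySem.List.pyGet? A (k : Int) with
    | none => ([], k)
    | some v =>
      let mcnt := if v = cand then mcnt + 1 else mcnt
      let k' := k + 1
      let length : Int := (k' : Int) - (start : Int)
      let entry := if 2 * mcnt > length then some cand else none
      if 2 * mcnt = length then ([entry], k')
      else
        let r := leaderAltInner A start cand fuel k' mcnt
        (entry :: r.1, r.2)

-- Source B's outer while loop: cand = A[start] (the pyGet? guard is start < n); fuel = n suffices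
-- since every block advances start by at least one.
def leaderAltOuter (A : List Int) : Nat → Nat → List (Option Int)
  | 0, _ => []
  | fuel + 1, start =>
    match PySem.List.pyGet? A (start : Int) with
    | none => []
    | some cand =>
      let r := leaderAltInner A start cand (A.length - start) start 0
      r.1 ++ leaderAltOuter A fuel r.2

def leader_all_alt (A : List Int) : List (Option Int) :=
  leaderAltOuter A A.length 0

-- ===== PRECONDITION & SPEC =====
def Spec_leader_all (A : List Int) (out : List (Option Int)) : Prop := out = leader_all_alt A
instance (A : List Int) (out : List (Option Int)) : Decidable (Spec_leader_all A out) := by unfold Spec_leader_all; infer_instance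

-- ===== CLAIM (what is proved, stated in full; the proofs are below) =====
def Claim_equal_leader_all : Prop := ∀ (A : List Int), Dom_leader_all A → Spec_leader_all A (leader_all A)

-- ===== LEMMAS AND PROOFS =====

-- Reference: the scalar Boyer-Moore vote; both ports are proved equal to it.
def bmGo (candidate : Option Int) (count : Int) : List Int → List (Option Int)
  | [] => []
  | value :: rest =>
    let cc :=
      if count = 0 then (some value, (1 : Int))
      else if some value = candidate then (candidate, count + 1)
      else (candidate, count - 1)
    (if cc.2 > 0 then cc.1 else none) :: bmGo cc.1 cc.2 rest

lemma getLast?_replicate_pos (cnt : Nat) (c : Int) (h : 0 < cnt) :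
    (List.replicate cnt c).getLast? = some c := by
  obtain ⟨m, rfl⟩ : ∃ m, cnt = m + 1 := ⟨cnt - 1, by omega⟩
  simp [List.replicate_succ']

lemma go_eq (l : List Int) : ∀ (counter : Int) (i cnt : Nat) (c : Int) (cand : Option Int),
    (cnt > 0 → cand = some c) → 2 * counter = (i : Int) + cnt →
    leaderAllGo (List.replicate cnt c) counter i l = bmGo cand (cnt : Int) l := by
  induction l with
  | nil => intro _ _ _ _ _ _ _; simp [leaderAllGo, bmGo]
  | cons v rest ih =>
    intro counter i cnt c cand hcand hctr
    rcases Nat.eq_zero_or_pos cnt with h0 | hpos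
    · subst h0
      have hlt : (((i + 1) / 2 : Nat) : Int) < counter + 1 := by omega
      simp only [List.replicate_zero, Nat.cast_zero] at *
      have hrec := ih (counter + 1) (i + 1) 1 v (some v) (fun _ => rfl) (by push_cast; omega)
      simp only [List.replicate_succ, List.replicate_zero, Nat.cast_one] at hrec
      simp [leaderAllGo, bmGo, List.head!, hrec]
      omega
    · have hc : cand = some c := hcand hpos
      subst hc
      have hlen : ¬ (List.replicate cnt c).length = 0 := by simp; omega
      have hlastq : (List.replicate cnt c).getLast? = some c := getLast?_replicate_pos cnt c hpos
      have hlast : (List.replicate cnt c).getLast! = c := by simp [hlastq]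
      have hcz : ¬ ((cnt : Int) = 0) := by omega
      have hczn : ¬ (cnt = 0) := by omega
      by_cases hv : v = c
      · subst hv
        have hrep : List.replicate cnt v ++ [v] = List.replicate (cnt + 1) v := by
          rw [List.replicate_succ']
        have hrec := ih (counter + 1) (i + 1) (cnt + 1) v (some v) (fun _ => rfl)
          (by push_cast at hctr ⊢; omega)
        simp only [List.replicate_succ, Nat.cast_add, Nat.cast_one] at hrec
        simp [leaderAllGo, bmGo, hlastq, hczn, hrep,
          List.replicate_succ, List.head!, hrec]
        omega
      · have hrep : (List.replicate cnt c).dropLast = List.replicate (cnt - 1) c := by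
          rw [List.dropLast_replicate]
        have hne : v ≠ (List.replicate cnt c).getLast! := by rw [hlast]; exact hv
        have hvc : ¬ (some v = some c) := by simp [hv]
        have hcast : (cnt : Int) - 1 = ((cnt - 1 : Nat) : Int) := by omega
        simp only [leaderAllGo, bmGo]
        simp only [if_neg hlen, if_pos hne, if_neg hcz, if_neg hvc, gt_iff_lt, hrep]
        have htest : ((((i + 1) / 2 : Nat) : Int) < counter) ↔ ((0:Int) < (cnt:Int) - 1) := by
          omega
        have hrec : leaderAllGo (List.replicate (cnt - 1) c) counter (i + 1) rest
            = bmGo (some c) ((cnt:Int) - 1) rest := by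
          rw [hcast]
          exact ih counter (i + 1) (cnt - 1) c (some c) (fun _ => rfl) (by omega)
        by_cases ht : (0:Int) < (cnt:Int) - 1
        · have ht2 : cnt - 1 > 0 := by omega
          have hhead : (List.replicate (cnt - 1) c).head! = c := by
            obtain ⟨m, hm⟩ : ∃ m, cnt - 1 = m + 1 := ⟨cnt - 2, by omega⟩
            rw [hm, List.replicate_succ]; rfl
          rw [if_pos (htest.mpr ht), if_pos ht, hhead, hrec]
        · rw [if_neg (fun h => ht (htest.mp h)), if_neg ht, hrec]

lemma inner_eq (A : List Int) (start : Nat) (c : Int) (ofuel : Nat)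
    (Hout : ∀ (k : Nat) (cand : Option Int), A.length ≤ k + ofuel →
      bmGo cand 0 (A.drop k) = leaderAltOuter A ofuel k) :
    ∀ (ifuel k : Nat) (m : Nat), A.length ≤ k + ifuel → start ≤ k →
      A.length ≤ k + 1 + ofuel →
      0 < 2 * (m : Int) - ((k : Int) - (start : Int)) →
      bmGo (some c) (2 * (m : Int) - ((k : Int) - (start : Int))) (A.drop k) =
        (leaderAltInner A start c ifuel k m).1 ++
          leaderAltOuter A ofuel (leaderAltInner A start c ifuel k m).2 := by
  intro ifuel
  induction ifuel with
  | zero =>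
    intro k m hlen hsk hko hcnt
    have hd : A.drop k = [] := List.drop_eq_nil_iff.mpr (by omega)
    have h0 := Hout k (some c) (by omega)
    rw [hd] at h0 ⊢
    simp only [bmGo] at h0 ⊢
    simp [leaderAltInner, ← h0]
  | succ ifuel ih =>
    intro k m hlen hsk hko hcnt
    by_cases hk : k < A.length
    · have hget : PySem.List.pyGet? A (k : Int) = some (A[k]'hk) := by
        simp [List.getElem?_eq_getElem hk]
      have hd : A.drop k = A[k]'hk :: A.drop (k + 1) := List.drop_eq_getElem_cons hk
      have hne0 : ¬ (2 * (m : Int) - ((k : Int) - (start : Int)) = 0) := by omega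
      rw [hd]
      simp only [bmGo, leaderAltInner, hget, if_neg hne0]
      by_cases hv : A[k]'hk = c
      · have hsome : (some (A[k]'hk) = some c) := by rw [hv]
        have hrec := ih (k + 1) (m + 1) (by omega) (by omega) (by omega)
            (by push_cast; omega)
        push_cast at hrec
        simp only [if_pos hsome, if_pos hv]
        push_cast
        have hnbrk : ¬ ((2 : Int) * ((m : Int) + 1) = (k : Int) + 1 - (start : Int)) := by
          omega
        rw [if_neg hnbrk]
        simp only [List.cons_append]
        rw [show (2 : Int) * ((m : Int) + 1) - ((k : Int) + 1 - (start : Int))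
            = 2 * (m : Int) - ((k : Int) - (start : Int)) + 1 from by ring] at hrec
        rw [hrec]
        congr 1
        split_ifs with h1 h2 <;> first | rfl | omega
      · have hnsome : ¬ (some (A[k]'hk) = some c) := by simp [hv]
        simp only [if_neg hnsome, if_neg hv]
        push_cast
        by_cases hbrk : (2 : Int) * (m : Int) = (k : Int) + 1 - (start : Int)
        · have h0 := Hout (k + 1) (some c) (by omega)
          rw [if_pos hbrk]
          rw [show (2 : Int) * (m : Int) - ((k : Int) - (start : Int)) - 1 = 0 from by omega]
          rw [h0]
          simp only [List.cons_append, List.nil_append]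
          congr 1
          split_ifs with h1 h2 <;> first | rfl | omega
        · have hrec := ih (k + 1) m (by omega) (by omega) (by omega)
              (by push_cast; omega)
          push_cast at hrec
          rw [if_neg hbrk]
          simp only [List.cons_append]
          rw [show (2 : Int) * (m : Int) - ((k : Int) + 1 - (start : Int))
              = 2 * (m : Int) - ((k : Int) - (start : Int)) - 1 from by ring] at hrec
          rw [hrec]
          congr 1
          split_ifs with h1 h2 <;> first | rfl | omega
    · have hget : PySem.List.pyGet? A (k : Int) = none := by
        simp [List.getElem?_eq_none (by omega : A.length ≤ k)]
      have hd : A.drop k = [] := List.drop_eq_nil_iff.mpr (by omega)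
      have h0 := Hout k (some c) (by omega)
      rw [hd] at h0 ⊢
      simp only [bmGo] at h0 ⊢
      simp [leaderAltInner, hget, ← h0]

lemma outer_eq (A : List Int) :
    ∀ (ofuel k : Nat) (cand : Option Int), A.length ≤ k + ofuel →
      bmGo cand 0 (A.drop k) = leaderAltOuter A ofuel k := by
  intro ofuel
  induction ofuel with
  | zero =>
    intro k cand h
    have hd : A.drop k = [] := List.drop_eq_nil_iff.mpr (by omega)
    rw [hd]
    simp [bmGo, leaderAltOuter]
  | succ ofuel ih =>
    intro k cand h
    by_cases hk : k < A.length
    · have hget : PySem.List.pyGet? A (k : Int) = some (A[k]'hk) := by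
        simp [List.getElem?_eq_getElem hk]
      have hd : A.drop k = A[k]'hk :: A.drop (k + 1) := List.drop_eq_getElem_cons hk
      rw [hd]
      -- unfold one step of bmGo (count = 0 branch), the outer loop, and the first inner step
      have hfe : A.length - k = (A.length - (k + 1)) + 1 := by omega
      have hinner := inner_eq A k (A[k]'hk) ofuel ih (A.length - (k + 1)) (k + 1) 1
          (by omega) (by omega) (by omega) (by push_cast; omega)
      push_cast at hinner
      rw [show ((2 : Int) - ((k : Int) + 1 - (k : Int))) = 1 from by ring] at hinner
      simp only [leaderAltOuter, hget, hfe, leaderAltInner]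
      simp only [bmGo]
      push_cast
      have hnbrk : ¬ ((2 : Int) = (k : Int) + 1 - (k : Int)) := by omega
      rw [if_neg hnbrk]
      simp only [List.cons_append]
      norm_num
      rw [hinner]
    · have hget : PySem.List.pyGet? A (k : Int) = none := by
        simp [List.getElem?_eq_none (by omega : A.length ≤ k)]
      have hd : A.drop k = [] := List.drop_eq_nil_iff.mpr (by omega)
      rw [hd]
      simp [bmGo, leaderAltOuter, hget]

-- ===== VERDICT (by name: the statement is the Claim_ definition above) =====
theorem leader_all_spec : Claim_equal_leader_all := by
  intro A _
  unfold Spec_leader_all leader_all leader_all_alt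
  have h1 := go_eq A 0 0 0 0 none (by omega) (by simp)
  have h2 := outer_eq A A.length 0 none (by omega)
  simp only [List.drop_zero] at h2
  simpa using h1.trans h2
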